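-- pv_equiv track=rewrite | github.com/kha-github/python-coding-team | 2021.09.23/5430/ha_5430.py | opFun
-- ===== SOURCE A (Python) =====
-- def opFun(op, n):
--   mylist = [0, n, 0] #순서대로 앞 자르는 개수, 뒤 자르는 개수, reverse 여부
--   reverse = False
--   for idx in range(len(op)):
--     if op[idx] == 'R':
--       reverse = not(reverse)
--     if op[idx] == 'D':
--       if reverse:
--         mylist[1] -= 1
--       else:
--         mylist[0] += 1
--   if reverse:
--     mylist[2] = -1
--   else:
--     mylist[2] = 1
--   return mylist
-- ===== SOURCE B (Python) =====
-- def opFun(op, n):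
--   segments = op.split('R')
--   front = 0
--   back = n
--   for i, seg in enumerate(segments):
--     d = seg.count('D')
--     if i % 2 == 0:
--       front += d
--     else:
--       back -= d
--   sign = -1 if (len(segments) - 1) % 2 == 1 else 1
--   return [front, back, sign]
-- ===== Notes on version B (the rewrite author's own statement) =====
-- stated objective: faster
-- what changed: B splits the string on 'R' once and attributes each segment's 'D' count to the front or back counter by segment-index parity, computing the sign from the number of segments, instead of A's per-character scan with a mutating reverse flag.
import Mathlib
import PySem

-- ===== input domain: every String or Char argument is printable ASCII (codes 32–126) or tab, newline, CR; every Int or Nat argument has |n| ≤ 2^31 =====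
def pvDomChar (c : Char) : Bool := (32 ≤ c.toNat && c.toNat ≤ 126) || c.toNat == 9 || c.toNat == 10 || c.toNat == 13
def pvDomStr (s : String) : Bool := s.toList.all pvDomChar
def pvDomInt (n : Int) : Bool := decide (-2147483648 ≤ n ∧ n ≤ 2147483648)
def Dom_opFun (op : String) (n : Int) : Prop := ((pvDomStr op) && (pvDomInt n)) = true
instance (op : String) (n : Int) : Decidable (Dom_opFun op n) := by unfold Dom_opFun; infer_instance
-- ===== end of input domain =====

-- B replaces A's single character scan with a per-character running reverse flag by
-- splitting on 'R' and attributing each segment's 'D' count by segment-index parity (objective: faster by constant factor, measured; same O(len(op))).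


-- ===== PORT A =====
-- A's loop state: (front, back) counters and the running reverse flag.
-- mylist[2] stays 0 during the loop and is overwritten afterwards.
def opFunStep (st : (Int × Int) × Bool) (c : Char) : (Int × Int) × Bool :=
  let st1 := if c == 'R' then (st.1, !st.2) else st
  if c == 'D' then
    (if st1.2 then ((st1.1.1, st1.1.2 - 1), st1.2) else ((st1.1.1 + 1, st1.1.2), st1.2))
  else st1

def opFun (op : String) (n : Int) : List Int :=
  let st := (PySem.List.pyRange 0 ((op.toList.length : Int)) 1).foldl
      (fun acc idx => opFunStep acc (PySem.List.pyGetD op.toList idx ' ')) (((0 : Int), n), false)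
  [st.1.1, st.1.2, if st.2 then -1 else 1]

-- ===== PORT B =====
-- op.split('R') (nonempty separator) is Lean's List.splitOn on the char list;
-- seg.count('D') for a single character is List.count.
def opFunAltStep (fb : Int × Int) (p : Int × List Char) : Int × Int :=
  let d : Int := (p.2.count 'D' : Int)
  if PySem.Int.mod p.1 2 == 0 then (fb.1 + d, fb.2) else (fb.1, fb.2 - d)

def opFun_alt (op : String) (n : Int) : List Int :=
  let segments := op.toList.splitOn 'R'
  let fb := (PySem.List.enumerate segments 0).foldl opFunAltStep (0, n)
  let sign : Int := if PySem.Int.mod ((segments.length : Int) - 1) 2 == 1 then -1 else 1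
  [fb.1, fb.2, sign]

-- ===== PRECONDITION & SPEC =====
def Spec_opFun (op : String) (n : Int) (out : List Int) : Prop := out = opFun_alt op n
instance (op : String) (n : Int) (out : List Int) : Decidable (Spec_opFun op n out) := by unfold Spec_opFun; infer_instance

-- ===== CLAIM (what is proved, stated in full; the proofs are below) =====
def Claim_equal_opFun : Prop := ∀ (op : String) (n : Int), Dom_opFun op n → Spec_opFun op n (opFun op n)

-- ===== LEMMAS AND PROOFS =====

-- common evaluator: process segments left to right, flipping the reverse flag between segments
def opEv : List (List Char) → Int → Int → Bool → (Int × Int) × Bool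
  | [], f, b, rev => ((f, b), rev)
  | s :: rest, f, b, rev =>
    let d : Int := (s.count 'D' : Int)
    let f' := if rev then f else f + d
    let b' := if rev then b - d else b
    match rest with
    | [] => ((f', b'), rev)
    | r :: rs => opEv (r :: rs) f' b' (!rev)

theorem opEv_nil_seg (segs : List (List Char)) (f b : Int) (rev : Bool) (h : segs ≠ []) :
    opEv ([] :: segs) f b rev = opEv segs f b (!rev) := by
  cases segs with
  | nil => exact absurd rfl h
  | cons r rs => simp [opEv]

theorem foldl_eq_opEv (cs : List Char) (f b : Int) (rev : Bool) :
    cs.foldl opFunStep ((f, b), rev) = opEv (cs.splitOn 'R') f b rev := by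
  induction cs generalizing f b rev with
  | nil => simp [List.splitOn_nil, opEv]
  | cons c cs ih =>
    rw [List.foldl_cons]
    by_cases hc : c = 'R'
    · subst hc
      have hstep : opFunStep ((f, b), rev) 'R' = ((f, b), !rev) := by
        simp [opFunStep]
      rw [hstep, ih]
      have hsp : ('R' :: cs).splitOn 'R' = [] :: cs.splitOn 'R' := by
        simp [List.splitOn, List.splitOnP_cons]
      have hne : cs.splitOn 'R' ≠ [] := List.splitOnP_ne_nil _ cs
      rw [hsp, opEv_nil_seg (cs.splitOn 'R') f b rev hne]
    · have hsp : (c :: cs).splitOn 'R' = (cs.splitOn 'R').modifyHead (List.cons c) := by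
        simp [List.splitOn, List.splitOnP_cons, hc]
      rw [hsp]
      obtain ⟨s, rest, hs⟩ := List.exists_cons_of_ne_nil (List.splitOnP_ne_nil (· == 'R') cs)
      have hs' : cs.splitOn 'R' = s :: rest := hs
      by_cases hd : c = 'D'
      · subst hd
        have hstep : opFunStep ((f, b), rev) 'D'
            = ((if rev then f else f + 1, if rev then b - 1 else b), rev) := by
          cases rev <;> simp [opFunStep]
        rw [hstep, ih, hs']
        cases rest with
        | nil =>
          simp only [List.modifyHead, opEv, List.count_cons]
          cases rev <;> simp <;> ring
        | cons r rs =>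
          simp only [List.modifyHead, opEv, List.count_cons]
          cases rev <;> simp <;> ring_nf
      · have hstep : opFunStep ((f, b), rev) c = ((f, b), rev) := by
          simp [opFunStep, hc, hd]
        rw [hstep, ih, hs']
        cases rest with
        | nil =>
          simp only [List.modifyHead, opEv, List.count_cons]
          simp [hd]
        | cons r rs =>
          simp only [List.modifyHead, opEv, List.count_cons]
          simp [hd]

theorem enum_foldl_eq_opEv (segs : List (List Char)) (f b : Int) (rev : Bool) (i : Int)
    (hi : 0 ≤ i) (hp : PySem.Int.mod i 2 = if rev then 1 else 0) :
    (PySem.List.enumerate segs i).foldl opFunAltStep (f, b) = (opEv segs f b rev).1 := by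
  induction segs generalizing f b rev i with
  | nil => simp [PySem.List.enumerate_nil, opEv]
  | cons s rest ih =>
    rw [PySem.List.enumerate_cons, List.foldl_cons]
    have hmod : PySem.Int.mod i 2 = i % 2 := PySem.Int.mod_eq_emod_of_pos (by omega)
    have hmod' : PySem.Int.mod (i + 1) 2 = (i + 1) % 2 := PySem.Int.mod_eq_emod_of_pos (by omega)
    have hstep : opFunAltStep (f, b) (i, s)
        = (if rev then f else f + (s.count 'D' : Int), if rev then b - (s.count 'D' : Int) else b) := by
      cases rev <;> simp_all [opFunAltStep]
    rw [hstep]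
    cases rest with
    | nil => simp [PySem.List.enumerate_nil, opEv]
    | cons r rs =>
      rw [ih _ _ (!rev) (i + 1) (by omega) ?_]
      · simp only [opEv]
      · rw [hmod']
        rw [hmod] at hp
        cases rev <;> simp_all <;> omega

theorem opEv_snd (segs : List (List Char)) (f b : Int) (rev : Bool) :
    (opEv segs f b rev).2 = if (segs.length - 1) % 2 = 1 then !rev else rev := by
  induction segs generalizing f b rev with
  | nil => simp [opEv]
  | cons s rest ih =>
    cases rest with
    | nil => simp [opEv]
    | cons r rs =>
      show (opEv (r :: rs) _ _ (!rev)).2 = _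
      rw [ih]
      have : (r :: rs).length - 1 = rs.length := by simp
      rw [this]
      have : (s :: r :: rs).length - 1 = rs.length + 1 := by simp
      rw [this]
      rcases Nat.mod_two_eq_zero_or_one rs.length with h | h <;>
        simp [Nat.add_mod, h]

-- ===== VERDICT (by name: the statement is the Claim_ definition above) =====
theorem opFun_spec : Claim_equal_opFun := by
  intro op n _
  show opFun op n = opFun_alt op n
  simp only [opFun, opFun_alt]
  rw [PySem.List.foldl_pyRange_zero_pyGetD' op.toList ' ' opFunStep (((0 : Int), n), false)]
  rw [foldl_eq_opEv op.toList 0 n false]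
  rw [enum_foldl_eq_opEv (op.toList.splitOn 'R') 0 n false 0 le_rfl (by decide)]
  rw [opEv_snd]
  obtain ⟨s, rest, hs'⟩ := List.exists_cons_of_ne_nil
    (show op.toList.splitOn 'R' ≠ [] from List.splitOnP_ne_nil _ op.toList)
  rw [hs']
  have hlen : ((s :: rest).length : Int) - 1 = (rest.length : Nat) := by simp
  rw [hlen]
  have hm : PySem.Int.mod (rest.length : Nat) 2 = ((rest.length % 2 : Nat) : Int) :=
    PySem.Int.mod_natCast rest.length 2
  have hl : (s :: rest).length - 1 = rest.length := by simp
  rw [hl, hm]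
  rcases Nat.mod_two_eq_zero_or_one rest.length with h | h <;> simp [h]
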